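-- pv_equiv track=rewrite | github.com/Thanhthanhbinh/C4TA05_DTTB | session_6.py | minTiles
-- ===== SOURCE A (Python) =====
-- def minTiles(n, m):
--
--     # base case, when area is 0.
--     if n == 0 or m == 0:
--         return 0
--
--     # If n and m both are even, calculate tiles for n/2 x m/2
--     # Halfing both dimensions doesn't change the number of tiles
--     elif n%2 == 0 and m%2 == 0:
--         return minTiles(int(n/2), int(m/2))
--
--     # If n is even and m is odd, Use a row of 1x1 tiles
--     elif n % 2 == 0 and m % 2 == 1:
--         return (n + minTiles(int(n/2), int(m/2)))
--
--     # If n is odd and m is even, Use a column of 1x1 tiles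
--     elif n % 2 == 1 and m % 2 == 0:
--         return (m + minTiles(int(n/2), int(m/2)))
--
--     # If n and m are odd, add row + column number of tiles
--     else:
--         return (n + m - 1 + minTiles(int(n/2), int(m/2)))
-- ===== SOURCE B (Python) =====
-- def minTiles(n, m):
--     # Iterative reformulation: one explicit loop with an accumulator instead of recursion.
--     total = 0
--     while n != 0 and m != 0:
--         if n % 2 != 0 and m % 2 != 0:
--             total += n + m - 1
--         elif n % 2 != 0:
--             total += m
--         elif m % 2 != 0:
--             total += n
--         n, m = int(n / 2), int(m / 2)
--     return total
-- ===== Notes on version B (the rewrite author's own statement) =====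
-- stated objective: simpler
-- what changed: Replaced the five-branch recursion with an explicit while-loop that accumulates the tiles added at each halving step (truncating int(n/2) kept exactly).
import Mathlib
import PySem

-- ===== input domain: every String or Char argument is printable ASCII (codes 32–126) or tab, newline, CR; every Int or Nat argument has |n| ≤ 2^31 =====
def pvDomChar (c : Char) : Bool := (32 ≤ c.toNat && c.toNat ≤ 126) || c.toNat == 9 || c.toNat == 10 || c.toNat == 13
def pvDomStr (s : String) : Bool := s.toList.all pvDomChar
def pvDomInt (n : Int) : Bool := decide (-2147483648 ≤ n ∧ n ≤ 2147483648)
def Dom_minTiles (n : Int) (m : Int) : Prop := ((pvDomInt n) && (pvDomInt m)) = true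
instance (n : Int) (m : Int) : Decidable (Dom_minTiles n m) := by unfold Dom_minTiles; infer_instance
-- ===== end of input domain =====

-- B replaces A's five-branch recursion with a single accumulator loop (simpler decomposition; same cost).
-- ===== PORT A =====
-- A's recursion, written with a structural fuel parameter (fuel = n.natAbs + 1 always
-- suffices: |int(n/2)| < |n| whenever n ≠ 0, so the 0-fuel branch is never reached).
-- Python's n % 2 is PySem.Int.mod; int(n/2) truncates toward zero = Int.tdiv.
def minTilesFuel : Nat → Int → Int → Int
  | 0, _, _ => 0
  | f + 1, n, m =>
    if n = 0 ∨ m = 0 then 0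
    else if PySem.Int.mod n 2 = 0 ∧ PySem.Int.mod m 2 = 0 then
      minTilesFuel f (n.tdiv 2) (m.tdiv 2)
    else if PySem.Int.mod n 2 = 0 ∧ PySem.Int.mod m 2 = 1 then
      n + minTilesFuel f (n.tdiv 2) (m.tdiv 2)
    else if PySem.Int.mod n 2 = 1 ∧ PySem.Int.mod m 2 = 0 then
      m + minTilesFuel f (n.tdiv 2) (m.tdiv 2)
    else
      n + m - 1 + minTilesFuel f (n.tdiv 2) (m.tdiv 2)

def minTiles (n : Int) (m : Int) : Int := minTilesFuel (n.natAbs + 1) n m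

-- ===== PORT B =====
-- the per-iteration increment of B's loop
def altStep (n : Int) (m : Int) : Int :=
  if PySem.Int.mod n 2 ≠ 0 ∧ PySem.Int.mod m 2 ≠ 0 then n + m - 1
  else if PySem.Int.mod n 2 ≠ 0 then m
  else if PySem.Int.mod m 2 ≠ 0 then n
  else 0

-- B's while-loop as a tail recursion over its state (n, m, total), same fuel scheme
def altLoopFuel : Nat → Int → Int → Int → Int
  | 0, _, _, total => total
  | f + 1, n, m, total =>
    if n = 0 ∨ m = 0 then total
    else altLoopFuel f (n.tdiv 2) (m.tdiv 2) (total + altStep n m)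

def minTiles_alt (n : Int) (m : Int) : Int := altLoopFuel (n.natAbs + 1) n m 0

-- ===== PRECONDITION & SPEC =====
def Spec_minTiles (n : Int) (m : Int) (out : Int) : Prop := out = minTiles_alt n m
instance (n : Int) (m : Int) (out : Int) : Decidable (Spec_minTiles n m out) := by unfold Spec_minTiles; infer_instance

-- ===== CLAIM (what is proved, stated in full; the proofs are below) =====
def Claim_equal_minTiles : Prop := ∀ (n : Int) (m : Int), Dom_minTiles n m → Spec_minTiles n m (minTiles n m)

-- ===== LEMMAS AND PROOFS =====

lemma altLoopFuel_eq (f : Nat) : ∀ (n m total : Int),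
    altLoopFuel f n m total = total + minTilesFuel f n m := by
  induction f with
  | zero => intro n m total; simp [altLoopFuel, minTilesFuel]
  | succ f ih =>
    intro n m total
    by_cases h : n = 0 ∨ m = 0
    · simp [altLoopFuel, minTilesFuel, h]
    · have en : PySem.Int.mod n 2 = n % 2 := PySem.Int.mod_eq_emod_of_pos (by omega)
      have em : PySem.Int.mod m 2 = m % 2 := PySem.Int.mod_eq_emod_of_pos (by omega)
      have hn := Int.emod_two_eq n
      have hm := Int.emod_two_eq m
      simp only [altLoopFuel, minTilesFuel, if_neg h, altStep, en, em]
      rw [ih]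
      generalize minTilesFuel f (n.tdiv 2) (m.tdiv 2) = R
      split_ifs <;> omega

-- ===== VERDICT =====
theorem minTiles_spec : Claim_equal_minTiles := by
  intro n m _
  unfold Spec_minTiles minTiles_alt minTiles
  rw [altLoopFuel_eq]; ring
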